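-- pv_equiv track=rewrite | github.com/michelangelolopes/tebdes-project-2021.1 | lib/prediction.py | get_each_feature_count
-- ===== SOURCE A (Python) =====
-- def get_each_feature_count(comments_classified):
--     feature_count = {}
--     for feature in comments_classified:
--         if feature not in feature_count:
--             feature_count[feature] = 1
--         else:
--             feature_count[feature] += 1
--
--     feature_count = sorted((key, value) for (key,value) in feature_count.items())
--     return feature_count
-- ===== SOURCE B (Python) =====
-- def get_each_feature_count(comments_classified):
--     # sort once, then emit (value, run_length) for each run of equal neighbours
--     s = sorted(comments_classified)
--     result = []
--     i = 0
--     n = len(s)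
--     while i < n:
--         j = i + 1
--         while j < n and s[j] == s[i]:
--             j += 1
--         result.append((s[i], j - i))
--         i = j
--     return result
-- ===== Notes on version B (the rewrite author's own statement) =====
-- stated objective: alternative
-- what changed: Replaces the frequency-dict-then-sort-items approach by sorting the input once and emitting (value, run-length) pairs for each run of equal consecutive elements in a single scan.
import Mathlib
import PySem

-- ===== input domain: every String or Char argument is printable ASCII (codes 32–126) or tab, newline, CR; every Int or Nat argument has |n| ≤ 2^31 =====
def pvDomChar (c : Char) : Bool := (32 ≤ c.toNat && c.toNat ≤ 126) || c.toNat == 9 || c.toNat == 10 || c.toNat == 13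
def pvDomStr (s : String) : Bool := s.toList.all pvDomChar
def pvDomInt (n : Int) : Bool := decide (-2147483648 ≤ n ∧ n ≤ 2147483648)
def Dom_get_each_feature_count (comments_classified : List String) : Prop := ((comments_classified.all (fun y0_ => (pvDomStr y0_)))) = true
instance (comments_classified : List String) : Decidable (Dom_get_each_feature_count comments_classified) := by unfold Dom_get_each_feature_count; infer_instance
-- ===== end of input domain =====

-- B sorts the input once and emits (value, run-length) pairs per run of equal neighbours,
-- instead of A's frequency dict followed by sorting its items (alternative algorithm, similar cost).


-- ===== PORT A =====
-- counting loop: 'if feature not in d: d[f] = 1 else: d[f] += 1', then sorted of d.items()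
def get_each_feature_count (comments_classified : List String) : List (String × Int) :=
  let feature_count : PySem.Dict String Int :=
    comments_classified.foldl
      (fun d feature =>
        if d.contains feature = false then d.insert feature 1
        else d.insert feature (d.getD feature 0 + 1))
      PySem.Dict.empty
  PySem.List.sorted2 feature_count.items (fun p => p.1) (fun p => p.2) false

-- ===== PORT B =====
-- the outer while loop of Source B: one run of equal leading elements per step
def pvGroupRuns (l : List String) : List (String × Int) :=
  match l with
  | [] => []
  | x :: rest =>
    let run := rest.takeWhile (fun y => y == x)
    (x, (1 : Int) + run.length) :: pvGroupRuns (rest.dropWhile (fun y => y == x))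
termination_by l.length
decreasing_by
  simp only [List.length_cons]
  exact Nat.lt_succ_of_le (List.Sublist.length_le (List.dropWhile_sublist _))

def get_each_feature_count_alt (comments_classified : List String) : List (String × Int) :=
  pvGroupRuns (PySem.List.sorted comments_classified (fun x => x) false)

-- ===== PRECONDITION & SPEC =====
def Spec_get_each_feature_count (comments_classified : List String) (out : List (String × Int)) : Prop := out = get_each_feature_count_alt comments_classified
instance (comments_classified : List String) (out : List (String × Int)) : Decidable (Spec_get_each_feature_count comments_classified out) := by unfold Spec_get_each_feature_count; infer_instance

-- ===== CLAIM (what is proved, stated in full; the proofs are below) =====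
def Claim_equal_get_each_feature_count : Prop := ∀ (comments_classified : List String), Dom_get_each_feature_count comments_classified → Spec_get_each_feature_count comments_classified (get_each_feature_count comments_classified)

-- ===== LEMMAS AND PROOFS =====

-- insertBy only looks at comparisons between the new element and members of the list
theorem pv_insertBy_congr {α : Type} (b1 b2 : α → α → Bool) (x : α) (acc : List α)
    (h : ∀ y ∈ acc, b1 x y = b2 x y) :
    PySem.List.insertBy b1 x acc = PySem.List.insertBy b2 x acc := by
  induction acc with
  | nil => rfl
  | cons y ys ih =>
    simp only [PySem.List.insertBy]
    rw [h y (by simp)]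
    split
    · rfl
    · rw [ih (fun z hz => h z (by simp [hz]))]

theorem pv_foldl_insertBy_congr {α : Type} (b1 b2 : α → α → Bool) (M : List α) :
    ∀ (acc : List α), (∀ x ∈ M, ∀ y ∈ acc, b1 x y = b2 x y) →
    M.Pairwise (fun a b => b1 b a = b2 b a) →
    M.foldl (fun acc x => PySem.List.insertBy b1 x acc) acc
      = M.foldl (fun acc x => PySem.List.insertBy b2 x acc) acc := by
  induction M with
  | nil => intro acc _ _; rfl
  | cons m rest ih =>
    intro acc hA hP
    simp only [List.foldl_cons]
    rw [pv_insertBy_congr b1 b2 m acc (fun y hy => hA m (by simp) y hy)]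
    apply ih
    · intro x hx y hy
      rcases (PySem.List.mem_insertBy b2 m y acc).mp hy with rfl | hy'
      · exact (List.pairwise_cons.mp hP).1 x hx
      · exact hA x (by simp [hx]) y hy'
    · exact (List.pairwise_cons.mp hP).2

-- on a list of pairs with pairwise distinct first components, Python's tuple sort is a sort by fst
theorem pv_sorted2_eq_sorted_fst (M : List (String × Int))
    (h : M.Pairwise (fun a b => a.1 ≠ b.1)) :
    PySem.List.sorted2 M (fun p => p.1) (fun p => p.2) false
      = PySem.List.sorted M (fun p => p.1) false := by
  rw [PySem.List.sorted_eq_foldl_insertBy]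
  show M.foldl (fun acc x => PySem.List.insertBy _ x acc) [] = _
  apply pv_foldl_insertBy_congr
  · intro _ _ _ hy; simp at hy
  · refine h.imp ?_
    intro a b hne
    rcases lt_trichotomy b.1 a.1 with hlt | heq | hgt
    · simp [hlt, not_lt.mpr (le_of_lt hlt)]
    · exact absurd heq.symm hne
    · simp [hgt, not_lt.mpr (le_of_lt hgt)]

-- Set.ofList of any list is a sublist of it
theorem pv_ofList_sublist {α : Type} [BEq α] [LawfulBEq α] (l : List α) : (PySem.Set.ofList l).Sublist l := by
  induction l with
  | nil => simp [PySem.Set.ofList]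
  | cons x xs ih =>
    rw [PySem.Set.ofList_cons]
    exact List.Sublist.cons₂ x (List.Sublist.trans (List.filter_sublist) ih)

-- x does not survive dropping its own copies from a tail it bounds below
theorem pv_not_mem_dropWhile (x : String) (rest : List String)
    (hx : ∀ y ∈ rest, x ≤ y) (hp : rest.Pairwise (· ≤ ·)) :
    x ∉ rest.dropWhile (fun y => y == x) := by
  induction rest with
  | nil => simp
  | cons y ys ih =>
    by_cases hyx : y = x
    · subst hyx
      rw [List.dropWhile_cons_of_pos (by simp)]
      exact ih (fun z hz => hx z (by simp [hz])) (List.pairwise_cons.mp hp).2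
    · rw [List.dropWhile_cons_of_neg (by simp [hyx])]
      intro hmem
      rcases List.mem_cons.mp hmem with rfl | hmem'
      · exact hyx rfl
      · have h1 : x ≤ y := hx y (by simp)
        have h2 : y ≤ x := (List.pairwise_cons.mp hp).1 x hmem'
        exact hyx (le_antisymm h2 h1)

theorem pv_discard_ofList_cons_self {α : Type} [BEq α] [LawfulBEq α] (x : α) (ls : List α) :
    PySem.Set.discard (PySem.Set.ofList (x :: ls)) x = PySem.Set.discard (PySem.Set.ofList ls) x := by
  rw [PySem.Set.ofList_cons]
  simp [PySem.Set.discard, List.filter_filter]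

theorem pv_discard_ofList_dropWhile (x : String) (l : List String) :
    PySem.Set.discard (PySem.Set.ofList l) x
      = PySem.Set.discard (PySem.Set.ofList (l.dropWhile (fun y => y == x))) x := by
  induction l with
  | nil => rfl
  | cons y ls ih =>
    by_cases hy : y = x
    · subst hy
      rw [List.dropWhile_cons_of_pos (by simp), pv_discard_ofList_cons_self]
      exact ih
    · rw [List.dropWhile_cons_of_neg (by simp [hy])]

-- the grouping lemma: on a non-decreasing list, run-length grouping is (distinct keys, counts)
theorem pv_groupRuns_eq (l : List String) (h : l.Pairwise (· ≤ ·)) :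
    pvGroupRuns l = (PySem.Set.ofList l).map (fun k => (k, (l.count k : Int))) := by
  induction l using pvGroupRuns.induct with
  | case1 => simp [pvGroupRuns, PySem.Set.ofList]
  | case2 x rest ih =>
    have hx : ∀ y ∈ rest, x ≤ y := (List.pairwise_cons.mp h).1
    have hpr : rest.Pairwise (· ≤ ·) := (List.pairwise_cons.mp h).2
    have ht : ∀ y ∈ rest.takeWhile (fun y => y == x), y = x := fun y hy => by
      have := List.mem_takeWhile_imp hy; simpa using this
    have hsplit : rest.takeWhile (fun y => y == x) ++ rest.dropWhile (fun y => y == x) = rest :=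
      List.takeWhile_append_dropWhile
    have hxd : x ∉ rest.dropWhile (fun y => y == x) := pv_not_mem_dropWhile x rest hx hpr
    have hpd : (rest.dropWhile (fun y => y == x)).Pairwise (· ≤ ·) :=
      List.Pairwise.sublist (List.dropWhile_sublist _) hpr
    have hdisc : PySem.Set.discard (PySem.Set.ofList (rest.dropWhile (fun y => y == x))) x
        = PySem.Set.ofList (rest.dropWhile (fun y => y == x)) := by
      simp only [PySem.Set.discard]
      apply List.filter_eq_self.mpr
      intro y hy
      have hyd : y ∈ rest.dropWhile (fun y => y == x) := (PySem.Set.mem_ofList _ _).mp hy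
      simp only [Bool.not_eq_eq_eq_not, Bool.not_true, beq_eq_false_iff_ne]
      intro hyx; exact hxd (hyx ▸ hyd)
    have hofl : PySem.Set.ofList (x :: rest) = x :: PySem.Set.ofList (rest.dropWhile (fun y => y == x)) := by
      rw [PySem.Set.ofList_cons]
      congr 1
      rw [pv_discard_ofList_dropWhile x rest, hdisc]
    have hcx : (x :: rest).count x = 1 + (rest.takeWhile (fun y => y == x)).length := by
      have h1 : (rest.dropWhile (fun y => y == x)).count x = 0 := List.count_eq_zero.mpr hxd
      have h2 : (rest.takeWhile (fun y => y == x)).count x = (rest.takeWhile (fun y => y == x)).length :=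
        List.count_eq_length.mpr (fun b hb => (ht b hb).symm)
      have h3 : rest.count x = (rest.takeWhile (fun y => y == x)).length := by
        conv_lhs => rw [← hsplit]
        rw [List.count_append, h1, h2]
        omega
      simp [h3]
      omega
    rw [pvGroupRuns, ih hpd, hofl, List.map_cons]
    congr 1
    · rw [hcx]; push_cast; ring_nf
    · apply List.map_congr_left
      intro k hk
      have hkd : k ∈ rest.dropWhile (fun y => y == x) := (PySem.Set.mem_ofList _ _).mp hk
      have hkx : k ≠ x := fun hkx => hxd (hkx ▸ hkd)
      have hkt : (rest.takeWhile (fun y => y == x)).count k = 0 :=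
        List.count_eq_zero.mpr (fun hmem => hkx (ht k hmem))
      have h4 : rest.count k = (rest.dropWhile (fun y => y == x)).count k := by
        conv_lhs => rw [← hsplit]
        rw [List.count_append, hkt]
        omega
      have : (x :: rest).count k = (rest.dropWhile (fun y => y == x)).count k := by
        simp [List.count_cons, h4]
        exact fun hxk => hkx hxk.symm
      rw [this]

-- both sides equal (sorted distinct keys).map (fun k => (k, count))
theorem pv_main (cs : List String) :
    get_each_feature_count cs = get_each_feature_count_alt cs := by
  simp only [get_each_feature_count, get_each_feature_count_alt]
  have hstep : (fun (d : PySem.Dict String Int) feature =>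
      if d.contains feature = false then d.insert feature 1
      else d.insert feature (d.getD feature 0 + 1))
      = fun d feature => d.insert feature (d.getD feature 0 + 1) := by
    funext d f
    by_cases hc : d.contains f = false
    · simp [hc, PySem.Dict.getD_of_not_contains d 0 hc]
    · simp [hc]
  rw [hstep, PySem.Dict.foldl_insert_getD_add_one_eq_counter, PySem.Dict.items_counter]
  -- the canonical list C
  have hC :
      pvGroupRuns (PySem.List.sorted cs (fun x => x) false)
        = (PySem.List.sorted (PySem.Set.ofList cs) (fun x => x) false).map
            (fun k => (k, (List.count k cs : Int))) := by
    rw [pv_groupRuns_eq _ (PySem.List.sorted_pairwise cs (fun x => x))]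
    have hperm : (PySem.List.sorted cs (fun x => x) false).Perm cs :=
      PySem.List.sorted_perm cs (fun x => x) false
    have hofl : PySem.Set.ofList (PySem.List.sorted cs (fun x => x) false)
        = PySem.List.sorted (PySem.Set.ofList cs) (fun x => x) false := by
      symm
      apply PySem.List.sorted_eq_of_perm_of_pairwise_lt
      · apply (List.perm_ext_iff_of_nodup (PySem.Set.nodup_ofList _) (PySem.Set.nodup_ofList _)).mpr
        intro a
        rw [PySem.Set.mem_ofList, PySem.Set.mem_ofList]
        exact hperm.mem_iff
      · have hle : (PySem.Set.ofList (PySem.List.sorted cs (fun x => x) false)).Pairwise (· ≤ ·) :=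
          List.Pairwise.sublist (pv_ofList_sublist _) (PySem.List.sorted_pairwise cs (fun x => x))
        have hne : (PySem.Set.ofList (PySem.List.sorted cs (fun x => x) false)).Pairwise (· ≠ ·) :=
          PySem.Set.nodup_ofList _
        exact (hle.and hne).imp (fun hab => lt_of_le_of_ne hab.1 hab.2)
    rw [hofl]
    apply List.map_congr_left
    intro k hk
    rw [hperm.count_eq]
  rw [hC]
  -- A's sorted2 over pairs with distinct firsts is a sort by fst, which the canonical list realizes
  have hnodup : (PySem.Set.ofList cs).Nodup := PySem.Set.nodup_ofList cs
  have hMne : ((PySem.Set.ofList cs).map (fun k => (k, (List.count k cs : Int)))).Pairwise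
      (fun a b => a.1 ≠ b.1) := by
    apply List.Pairwise.map _ _ hnodup
    intro a b hab
    simpa using hab
  rw [pv_sorted2_eq_sorted_fst _ hMne]
  apply PySem.List.sorted_eq_of_perm_of_pairwise_lt
  · exact (PySem.List.sorted_perm (PySem.Set.ofList cs) (fun x => x) false).map _
  · apply List.Pairwise.map _ _ (PySem.List.sorted_ofList_pairwise_lt cs)
    intro a b hab
    simpa using hab

-- ===== VERDICT (by name: the statement is the Claim_ definition above) =====
theorem get_each_feature_count_spec : Claim_equal_get_each_feature_count := by
  intro cs _
  exact pv_main cs
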